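-- pv_equiv track=rewrite | github.com/odobon1/biocosmos | preprocessing/common/phylo.py | get_parent_map_for_classes
-- ===== SOURCE A (Python) =====
-- from typing import Dict, List, Optional, Tuple, Set
--
-- RANK_ORDER = ["order", "family", "subfamily", "tribe", "genus"]
--
-- def compress_lineage(
--     cid_data: Dict[str, Optional[str]],
--     rank_order: Optional[List[str]] = None,
-- ) -> List[Tuple[str, str]]:
--     """
--     Returns the class's available lineage as a list of (rank, taxon),
--     skipping missing ranks (None).
--
--     Parameters
--     ----------
--     cid_data
--         Single class's class_data dict like {"family": "fam1", "subfamily": "sub1", ...}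
--     rank_order
--         Order to process ranks. If None, uses RANK_ORDER. Should go from broad to specific.
--
--     Example:
--         {
--             "family": "fam1",
--             "subfamily": "sub1",
--             "tribe": None,
--             "genus": "gen1",
--         }
--
--     becomes:
--         [("family", "fam1"), ("subfamily", "sub1"), ("genus", "gen1")]
--     """
--     if rank_order is None:
--         rank_order = RANK_ORDER
--
--     lineage = []
--     for rank in rank_order:
--         val = cid_data.get(rank)
--         if val is not None:
--             lineage.append((rank, val))
--     return lineage
--
-- def get_parent_map_for_classes(
--     class_data: Dict[str, Dict[str, Optional[str]]],
--     rank_order: Optional[List[str]] = None,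
-- ) -> Dict[str, Dict[str, Optional[Tuple[str, str]]]]:
--     """
--     For each class, returns a mapping:
--         rank -> parent(rank, taxon) within that class's compressed lineage
--
--     Parameters
--     ----------
--     class_data
--         Dict of class-id -> {rank: value, ...}
--     rank_order
--         Order to process ranks. If None, uses RANK_ORDER.
--
--     Example compressed lineage:
--         family -> subfamily -> genus
--
--     then:
--         family -> None
--         subfamily -> ("family", fam)
--         genus -> ("subfamily", subfam)
--     """
--     if rank_order is None:
--         rank_order = RANK_ORDER
--
--     out: Dict[str, Dict[str, Optional[Tuple[str, str]]]] = {}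
--
--     for cid, row in class_data.items():
--         lineage = compress_lineage(row, rank_order)
--         parent_info: Dict[str, Optional[Tuple[str, str]]] = {}
--         for i, (rank, taxon) in enumerate(lineage):
--             if i == 0:
--                 parent_info[rank] = None
--             else:
--                 parent_info[rank] = lineage[i - 1]
--         out[cid] = parent_info
--
--     return out
-- ===== SOURCE B (Python) =====
-- RANK_ORDER = ["order", "family", "subfamily", "tribe", "genus"]
--
-- def get_parent_map_for_classes(class_data, rank_order=None):
--     # Single pass per class: track the previous present (rank, taxon) in `prev`;
--     # no intermediate lineage list, no enumerate/index lookup.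
--     if rank_order is None:
--         rank_order = RANK_ORDER
--     out = {}
--     for cid, row in class_data.items():
--         parent_info = {}
--         prev = None
--         for rank in rank_order:
--             val = row.get(rank)
--             if val is not None:
--                 parent_info[rank] = prev
--                 prev = (rank, val)
--         out[cid] = parent_info
--     return out
-- ===== Notes on version B (the rewrite author's own statement) =====
-- stated objective: simpler
-- what changed: compress_lineage is gone: one fused loop over rank_order per class keeps the previous present (rank, taxon) in an accumulator variable, instead of building an intermediate lineage list and then indexing lineage[i-1] through enumerate.
import Mathlib
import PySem

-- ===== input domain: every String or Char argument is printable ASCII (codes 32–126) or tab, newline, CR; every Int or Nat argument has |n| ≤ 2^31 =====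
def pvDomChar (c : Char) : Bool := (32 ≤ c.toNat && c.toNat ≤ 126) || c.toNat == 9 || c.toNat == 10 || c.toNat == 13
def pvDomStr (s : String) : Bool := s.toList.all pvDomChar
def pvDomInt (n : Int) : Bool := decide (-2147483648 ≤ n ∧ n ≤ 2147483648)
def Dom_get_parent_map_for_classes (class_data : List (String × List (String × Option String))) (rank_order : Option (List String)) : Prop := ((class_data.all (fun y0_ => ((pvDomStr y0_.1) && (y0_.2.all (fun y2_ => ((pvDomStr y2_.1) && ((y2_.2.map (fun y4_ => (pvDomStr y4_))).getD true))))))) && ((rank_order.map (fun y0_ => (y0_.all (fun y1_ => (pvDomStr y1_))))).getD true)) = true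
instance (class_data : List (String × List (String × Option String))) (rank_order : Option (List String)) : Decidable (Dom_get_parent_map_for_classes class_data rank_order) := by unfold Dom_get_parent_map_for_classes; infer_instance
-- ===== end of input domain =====

-- B fuses A's two passes per class into one loop over rank_order with a `prev` accumulator,
-- dropping the intermediate lineage list and the enumerate/index lookup (objective: simpler).

-- ===== PORT A =====
def pvRankOrder : List String := ["order", "family", "subfamily", "tribe", "genus"]

-- compress_lineage: 'for rank in rank_order: val = cid_data.get(rank); if val is not None: lineage.append((rank, val))'
def pvCompressLineage (cid_data : PySem.Dict String (Option String)) (rank_order : List String) : List (String × String) :=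
  rank_order.foldl (fun lineage rank =>
    match cid_data.getD rank none with
    | some v => lineage ++ [(rank, v)]
    | none => lineage) []

def get_parent_map_for_classes (class_data : List (String × List (String × Option String))) (rank_order : Option (List String)) : List (String × List (String × Option (String × String))) :=
  let ro := rank_order.getD pvRankOrder
  ((PySem.Dict.ofList class_data).items.foldl
    (fun (out : PySem.Dict String (List (String × Option (String × String)))) cr =>
      let lineage := pvCompressLineage (PySem.Dict.ofList cr.2) ro
      let parent_info := (PySem.List.enumerate lineage 0).foldl
        (fun (pi : PySem.Dict String (Option (String × String))) p =>
          if p.1 = 0 then pi.insert p.2.1 none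
          else pi.insert p.2.1 (PySem.List.pyGet? lineage (p.1 - 1)))
        PySem.Dict.empty
      out.insert cr.1 parent_info.items)
    PySem.Dict.empty).items

-- ===== PORT B =====
def get_parent_map_for_classes_alt (class_data : List (String × List (String × Option String))) (rank_order : Option (List String)) : List (String × List (String × Option (String × String))) :=
  let ro := rank_order.getD pvRankOrder
  ((PySem.Dict.ofList class_data).items.foldl
    (fun (out : PySem.Dict String (List (String × Option (String × String)))) cr =>
      let row := PySem.Dict.ofList cr.2
      let parent_info := (ro.foldl
        (fun (st : PySem.Dict String (Option (String × String)) × Option (String × String)) rank =>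
          match row.getD rank none with
          | some v => (st.1.insert rank st.2, some (rank, v))
          | none => st)
        (PySem.Dict.empty, none)).1
      out.insert cr.1 parent_info.items)
    PySem.Dict.empty).items

-- ===== PRECONDITION & SPEC =====
def Spec_get_parent_map_for_classes (class_data : List (String × List (String × Option String))) (rank_order : Option (List String)) (out : List (String × List (String × Option (String × String)))) : Prop := out = get_parent_map_for_classes_alt class_data rank_order
instance (class_data : List (String × List (String × Option String))) (rank_order : Option (List String)) (out : List (String × List (String × Option (String × String)))) : Decidable (Spec_get_parent_map_for_classes class_data rank_order out) := by unfold Spec_get_parent_map_for_classes; infer_instance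

-- ===== CLAIM (what is proved, stated in full; the proofs are below) =====
def Claim_equal_get_parent_map_for_classes : Prop := ∀ (class_data : List (String × List (String × Option String))) (rank_order : Option (List String)), Dom_get_parent_map_for_classes class_data rank_order → Spec_get_parent_map_for_classes class_data rank_order (get_parent_map_for_classes class_data rank_order)

-- ===== LEMMAS AND PROOFS =====

-- prev-tracking loop over an already-compressed lineage (B's loop, rephrased on lineage elements)
def pvGoL (l : List (String × String)) (s : PySem.Dict String (Option (String × String)) × Option (String × String)) : PySem.Dict String (Option (String × String)) × Option (String × String) :=
  l.foldl (fun st p => (st.1.insert p.1 st.2, some p)) s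

theorem pvGoL_append (l m : List (String × String)) (s) :
    pvGoL (l ++ m) s = pvGoL m (pvGoL l s) := by
  simp [pvGoL, List.foldl_append]

theorem pvGoL_snd (l : List (String × String)) (h : l ≠ []) (s) :
    (pvGoL l s).2 = l.getLast? := by
  induction l generalizing s with
  | nil => exact absurd rfl h
  | cons p t ih =>
    cases t with
    | nil => simp [pvGoL]
    | cons q u =>
      rw [List.getLast?_cons_cons]
      exact ih (by simp) _

-- A's first pass is a filterMap
theorem pvLin_eq (cid_data : PySem.Dict String (Option String)) (ro : List String) (acc : List (String × String)) :
    ro.foldl (fun lineage rank =>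
      match cid_data.getD rank none with
      | some v => lineage ++ [(rank, v)]
      | none => lineage) acc
    = acc ++ ro.filterMap (fun rank => (cid_data.getD rank none).map (fun v => (rank, v))) := by
  induction ro generalizing acc with
  | nil => simp
  | cons r t ih =>
    cases h : cid_data.getD r none with
    | none => simp [List.foldl_cons, h, ih]
    | some v => simp [List.foldl_cons, h, ih]

-- B's fused loop is pvGoL over the compressed lineage
theorem pvB_eq_goL (row : PySem.Dict String (Option String)) (ro : List String) (s) :
    ro.foldl (fun (st : PySem.Dict String (Option (String × String)) × Option (String × String)) rank =>
      match row.getD rank none with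
      | some v => (st.1.insert rank st.2, some (rank, v))
      | none => st) s
    = pvGoL (ro.filterMap (fun rank => (row.getD rank none).map (fun v => (rank, v)))) s := by
  induction ro generalizing s with
  | nil => simp [pvGoL]
  | cons r t ih =>
    cases h : row.getD r none with
    | none => simp [List.foldl_cons, h, ih, pvGoL]
    | some v => simp [List.foldl_cons, h, ih, pvGoL, List.foldl_cons]

-- A's second pass (indexed lookups into the full lineage) equals the prev-tracking loop
theorem pvA_second_eq (L : List (String × String)) :
    (PySem.List.enumerate L 0).foldl
      (fun (pi : PySem.Dict String (Option (String × String))) p =>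
        if p.1 = 0 then pi.insert p.2.1 none
        else pi.insert p.2.1 (PySem.List.pyGet? L (p.1 - 1)))
      PySem.Dict.empty
    = (pvGoL L (PySem.Dict.empty, none)).1 := by
  induction L using List.reverseRecOn with
  | nil => simp [pvGoL, PySem.List.enumerate]
  | append_singleton L x ih =>
    rw [PySem.List.enumerate_append, List.foldl_append]
    have hcongr : (PySem.List.enumerate L 0).foldl
        (fun (pi : PySem.Dict String (Option (String × String))) p =>
          if p.1 = 0 then pi.insert p.2.1 none
          else pi.insert p.2.1 (PySem.List.pyGet? (L ++ [x]) (p.1 - 1)))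
        PySem.Dict.empty
      = (PySem.List.enumerate L 0).foldl
        (fun (pi : PySem.Dict String (Option (String × String))) p =>
          if p.1 = 0 then pi.insert p.2.1 none
          else pi.insert p.2.1 (PySem.List.pyGet? L (p.1 - 1)))
        PySem.Dict.empty := by
      apply PySem.List.foldl_congr_mem
      intro acc p hp
      rcases (PySem.List.mem_enumerate_iff _ _ _).1 hp with ⟨k, hk, rfl⟩
      by_cases h0 : ((0 : Int) + k) = 0
      · simp [h0]
      · have hk1 : 1 ≤ k := by omega
        have hidx : ((0 : Int) + k) - 1 = ((k - 1 : Nat) : Int) := by omega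
        simp only [h0, if_false, hidx, PySem.List.pyGet?_natCast]
        rw [List.getElem?_append_left (by omega)]
    rw [hcongr, ih]
    rw [pvGoL_append]
    by_cases hL : L = []
    · subst hL
      simp [pvGoL, PySem.List.enumerate]
    · have hlen : L.length ≠ 0 := by simpa [List.length_eq_zero_iff] using hL
      have h0 : ((0 : Int) + L.length) ≠ 0 := by
        simp only [Int.zero_add]; exact_mod_cast hlen
      have hidx : ((0 : Int) + L.length) - 1 = ((L.length - 1 : Nat) : Int) := by omega
      simp only [PySem.List.enumerate, pvGoL, List.foldl_cons, List.foldl_nil, h0, if_false]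
      rw [hidx, PySem.List.pyGet?_natCast, List.getElem?_append_left (by omega),
          ← List.getLast?_eq_getElem?, ← pvGoL_snd L hL (PySem.Dict.empty, none)]
      rfl

-- the per-class results agree
theorem pvInner_eq (row : PySem.Dict String (Option String)) (ro : List String) :
    (PySem.List.enumerate (pvCompressLineage row ro) 0).foldl
      (fun (pi : PySem.Dict String (Option (String × String))) p =>
        if p.1 = 0 then pi.insert p.2.1 none
        else pi.insert p.2.1 (PySem.List.pyGet? (pvCompressLineage row ro) (p.1 - 1)))
      PySem.Dict.empty
    = (ro.foldl (fun (st : PySem.Dict String (Option (String × String)) × Option (String × String)) rank =>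
        match row.getD rank none with
        | some v => (st.1.insert rank st.2, some (rank, v))
        | none => st) (PySem.Dict.empty, none)).1 := by
  rw [pvA_second_eq, pvB_eq_goL]
  have : pvCompressLineage row ro
      = ro.filterMap (fun rank => (row.getD rank none).map (fun v => (rank, v))) := by
    simpa using pvLin_eq row ro []
  rw [this]

-- ===== VERDICT (by name: the statement is the Claim_ definition above) =====
theorem get_parent_map_for_classes_spec : Claim_equal_get_parent_map_for_classes := by
  intro class_data rank_order _
  unfold Spec_get_parent_map_for_classes
  simp only [get_parent_map_for_classes, get_parent_map_for_classes_alt]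
  congr 1
  apply PySem.List.foldl_congr_mem
  intro acc cr _
  rw [pvInner_eq]
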